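-- pv_equiv track=rewrite | github.com/alejoriosm04/university-repository | Data-structure-and-algorithms-I/workshops/seguimiento-1/simulacro-entrevista-1/dividir.py | dividir_posicion_n
-- ===== SOURCE A (Python) =====
-- def dividir_posicion_n(arr, length, n, i, izquierda, derecha):
--     if length == i:
--         return izquierda, derecha
--     elif n <= i:
--         derecha.append(arr[i])
--         return dividir_posicion_n(arr, length, n, i+1, izquierda, derecha)
--     else:
--         izquierda.append(arr[i])
--         return dividir_posicion_n(arr, length, n, i+1, izquierda, derecha)
-- ===== SOURCE B (Python) =====
-- def dividir_posicion_n(arr, length, n, i, izquierda, derecha):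
--     for j in range(i, length):
--         (derecha if n <= j else izquierda).append(arr[j])
--     return izquierda, derecha
-- ===== Notes on version B (the rewrite author's own statement) =====
-- stated objective: simpler
-- what changed: Replaces the tail recursion (one call frame per element, threading i explicitly) with a single for-loop over range(i, length) that appends each element to the chosen side.
import Mathlib
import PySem

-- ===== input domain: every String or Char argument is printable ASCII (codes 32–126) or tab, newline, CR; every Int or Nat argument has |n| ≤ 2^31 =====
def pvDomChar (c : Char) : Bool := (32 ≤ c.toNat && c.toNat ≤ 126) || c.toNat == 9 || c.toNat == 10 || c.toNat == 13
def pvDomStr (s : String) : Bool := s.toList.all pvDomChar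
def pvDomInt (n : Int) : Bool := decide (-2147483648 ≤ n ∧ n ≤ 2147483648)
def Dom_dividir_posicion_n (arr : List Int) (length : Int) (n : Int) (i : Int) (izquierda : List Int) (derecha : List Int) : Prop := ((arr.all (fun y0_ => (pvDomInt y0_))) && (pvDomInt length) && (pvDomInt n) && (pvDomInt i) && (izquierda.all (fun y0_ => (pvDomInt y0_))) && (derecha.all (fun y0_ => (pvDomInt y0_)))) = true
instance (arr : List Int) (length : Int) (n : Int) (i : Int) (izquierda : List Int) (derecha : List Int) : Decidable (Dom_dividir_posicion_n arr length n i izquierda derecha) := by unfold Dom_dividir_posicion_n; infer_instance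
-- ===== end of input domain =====

-- B replaces A's tail recursion by a single for-loop over range(i, length); same cost, simpler.
-- Equivalence is about the RETURN value; both Pythons mutate izquierda/derecha in place identically on Pre_.

-- ===== PORT A =====
def dividir_posicion_n (arr : List Int) (length : Int) (n : Int) (i : Int) (izquierda : List Int) (derecha : List Int) : List Int × List Int :=
  if length = i then (izquierda, derecha)
  else if _h : length < i then (izquierda, derecha)
    -- totality bail-out only: here Python's recursion never returns (it raises); outside Pre_
  else
    match PySem.List.pyGet? arr i with
    | none => (izquierda, derecha)  -- IndexError in Python; outside Pre_
    | some x =>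
      if n ≤ i then dividir_posicion_n arr length n (i+1) izquierda (derecha ++ [x])
      else dividir_posicion_n arr length n (i+1) (izquierda ++ [x]) derecha
termination_by (length - i).toNat
decreasing_by all_goals omega

-- ===== PORT B =====
def dividir_posicion_n_alt (arr : List Int) (length : Int) (n : Int) (i : Int) (izquierda : List Int) (derecha : List Int) : List Int × List Int :=
  (PySem.List.pyRange i length 1).foldl
    (fun st j =>
      let x := (PySem.List.pyGet? arr j).getD 0  -- arr[j]; always in range inside Pre_ (the 0 default is never used there)
      if n ≤ j then (st.1, st.2 ++ [x]) else (st.1 ++ [x], st.2))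
    (izquierda, derecha)

-- ===== PRECONDITION & SPEC =====
-- Pre_: exactly the inputs where A's recursion reaches i = length with every arr[i] in range
-- (otherwise Python A raises IndexError or RecursionError and returns nothing).
def Pre_dividir_posicion_n (arr : List Int) (length : Int) (n : Int) (i : Int) (izquierda : List Int) (derecha : List Int) : Prop :=
  i ≤ length ∧ (i = length ∨ (-(arr.length : Int) ≤ i ∧ length ≤ (arr.length : Int)))
instance (arr : List Int) (length : Int) (n : Int) (i : Int) (izquierda : List Int) (derecha : List Int) : Decidable (Pre_dividir_posicion_n arr length n i izquierda derecha) := by unfold Pre_dividir_posicion_n; infer_instance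

def pvWitness_dividir_posicion_n : List Int × Int × Int × Int × List Int × List Int := ([3, 1, 4, 1], 4, 2, 0, [], [])

def Spec_dividir_posicion_n (arr : List Int) (length : Int) (n : Int) (i : Int) (izquierda : List Int) (derecha : List Int) (out : List Int × List Int) : Prop := out = dividir_posicion_n_alt arr length n i izquierda derecha
instance (arr : List Int) (length : Int) (n : Int) (i : Int) (izquierda : List Int) (derecha : List Int) (out : List Int × List Int) : Decidable (Spec_dividir_posicion_n arr length n i izquierda derecha out) := by unfold Spec_dividir_posicion_n; infer_instance

-- ===== CLAIM (what is proved, stated in full; the proofs are below) =====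
def Claim_equal_dividir_posicion_n : Prop := ∀ (arr : List Int) (length : Int) (n : Int) (i : Int) (izquierda : List Int) (derecha : List Int), Dom_dividir_posicion_n arr length n i izquierda derecha → Pre_dividir_posicion_n arr length n i izquierda derecha → Spec_dividir_posicion_n arr length n i izquierda derecha (dividir_posicion_n arr length n i izquierda derecha)

-- ===== LEMMAS AND PROOFS =====

theorem dividir_agree (arr : List Int) (length n : Int) : ∀ (k : Nat) (i : Int) (izq der : List Int),
    (length - i).toNat = k → i ≤ length →
    (i = length ∨ (-(arr.length : Int) ≤ i ∧ length ≤ (arr.length : Int))) →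
    dividir_posicion_n arr length n i izq der = dividir_posicion_n_alt arr length n i izq der := by
  intro k
  induction k with
  | zero =>
    intro i izq der hk hle _
    have hi : i = length := by omega
    subst hi
    simp [dividir_posicion_n, dividir_posicion_n_alt, PySem.List.pyRange_one_eq_nil (le_refl i)]
  | succ k ih =>
    intro i izq der hk hle hrange
    have hlt : i < length := by omega
    have hr : -(arr.length : Int) ≤ i ∧ length ≤ (arr.length : Int) := by
      rcases hrange with h | h
      · omega
      · exact h
    have hsome : PySem.List.pyGet? arr i ≠ none := by
      intro h
      rw [PySem.List.pyGet?_eq_none_iff] at h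
      exact h (by simp [PySem.Raise.InRange]; omega)
    obtain ⟨x, hx⟩ := Option.ne_none_iff_exists'.mp hsome
    rw [dividir_posicion_n]
    rw [if_neg (by omega), dif_neg (by omega), hx]
    rw [dividir_posicion_n_alt, PySem.List.pyRange_one_cons hlt]
    simp only [List.foldl_cons, hx, Option.getD_some]
    by_cases hn : n ≤ i
    · rw [if_pos hn, ih (i + 1) izq (der ++ [x]) (by omega) (by omega) (by omega)]
      simp [dividir_posicion_n_alt, hn]
    · rw [if_neg hn, ih (i + 1) (izq ++ [x]) der (by omega) (by omega) (by omega)]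
      simp [dividir_posicion_n_alt, hn]

-- ===== VERDICT (by name: the statement is the Claim_ definition above) =====
theorem dividir_posicion_n_spec : Claim_equal_dividir_posicion_n := by
  intro arr length n i izq der _ hpre
  exact dividir_agree arr length n (length - i).toNat i izq der rfl hpre.1 hpre.2
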